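-- pv_equiv track=rewrite | github.com/Leobatman/Cyberghost-OSINT | Cyberghost-OSINT-01.py | _categorize_subdomains
-- ===== SOURCE A (Python) =====
-- from typing import Dict, List, Any, Optional, Tuple, Set
--
-- def _categorize_subdomains(subdomains: List[str]) -> Dict[str, List[str]]:
--     """Categorize subdomains by service type"""
--     categories = {
--         'web': [],
--         'mail': [],
--         'database': [],
--         'infrastructure': [],
--         'development': [],
--         'cloud': [],
--         'other': []
--     }
--
--     patterns = {
--         'web': ['www', 'web', 'site', 'blog', 'portal', 'app', 'apps', 'api'],
--         'mail': ['mail', 'smtp', 'pop', 'imap', 'exchange', 'owa', 'mx'],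
--         'database': ['db', 'mysql', 'postgres', 'mongo', 'redis', 'elastic'],
--         'infrastructure': ['ns', 'dns', 'vpn', 'proxy', 'gateway', 'router'],
--         'development': ['dev', 'test', 'staging', 'jenkins', 'git', 'svn'],
--         'cloud': ['aws', 'azure', 'gcp', 'cloud', 'storage', 'cdn']
--     }
--
--     for subdomain in subdomains:
--         categorized = False
--         for category, keywords in patterns.items():
--             for keyword in keywords:
--                 if keyword in subdomain.lower():
--                     categories[category].append(subdomain)
--                     categorized = True
--                     break
--             if categorized:
--                 break
--
--         if not categorized:
--             categories['other'].append(subdomain)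
--
--     return categories
-- ===== SOURCE B (Python) =====
-- def _categorize_subdomains(subdomains):
--     """Categorize subdomains by service type (per-category scans with a cumulative prior-keyword list)"""
--     patterns = [
--         ('web', ['www', 'web', 'site', 'blog', 'portal', 'app', 'apps', 'api']),
--         ('mail', ['mail', 'smtp', 'pop', 'imap', 'exchange', 'owa', 'mx']),
--         ('database', ['db', 'mysql', 'postgres', 'mongo', 'redis', 'elastic']),
--         ('infrastructure', ['ns', 'dns', 'vpn', 'proxy', 'gateway', 'router']),
--         ('development', ['dev', 'test', 'staging', 'jenkins', 'git', 'svn']),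
--         ('cloud', ['aws', 'azure', 'gcp', 'cloud', 'storage', 'cdn']),
--     ]
--     result = {}
--     prior = []
--     for cat, kws in patterns:
--         result[cat] = [s for s in subdomains
--                        if any(k in s.lower() for k in kws)
--                        and not any(k in s.lower() for k in prior)]
--         prior = prior + kws
--     result['other'] = [s for s in subdomains
--                        if not any(k in s.lower() for k in prior)]
--     return result
-- ===== Notes on version B (the rewrite author's own statement) =====
-- stated objective: alternative
-- what changed: Replaces A's per-subdomain scan over categories with break/flag and dict-append mutation by per-category full passes: each category's bucket is one list comprehension over all subdomains filtering on 'matches this category and matches no keyword of any earlier category', maintained via a cumulative prior-keyword list; 'other' is the final leftover pass.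
import Mathlib
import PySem

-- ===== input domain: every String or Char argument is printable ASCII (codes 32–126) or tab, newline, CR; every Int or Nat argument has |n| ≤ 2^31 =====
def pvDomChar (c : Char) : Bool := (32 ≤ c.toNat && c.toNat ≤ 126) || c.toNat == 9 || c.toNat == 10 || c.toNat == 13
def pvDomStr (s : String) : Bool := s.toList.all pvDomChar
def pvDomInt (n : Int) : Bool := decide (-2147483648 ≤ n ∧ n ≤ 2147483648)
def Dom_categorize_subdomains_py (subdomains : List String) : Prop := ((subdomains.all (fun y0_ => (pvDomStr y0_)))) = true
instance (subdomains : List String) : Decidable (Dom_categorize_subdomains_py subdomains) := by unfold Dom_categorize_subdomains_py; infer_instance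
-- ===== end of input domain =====

-- B changes the decomposition: per-category passes over all subdomains with a cumulative
-- prior-keyword list, instead of A's per-subdomain category scan with break/flag and dict
-- mutation; same asymptotic cost.

-- the fixed keyword table (shared data)
def pvK1 : List String := ["www", "web", "site", "blog", "portal", "app", "apps", "api"]
def pvK2 : List String := ["mail", "smtp", "pop", "imap", "exchange", "owa", "mx"]
def pvK3 : List String := ["db", "mysql", "postgres", "mongo", "redis", "elastic"]
def pvK4 : List String := ["ns", "dns", "vpn", "proxy", "gateway", "router"]
def pvK5 : List String := ["dev", "test", "staging", "jenkins", "git", "svn"]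
def pvK6 : List String := ["aws", "azure", "gcp", "cloud", "storage", "cdn"]
def pvPatterns : List (String × List String) :=
  [("web", pvK1), ("mail", pvK2), ("database", pvK3),
   ("infrastructure", pvK4), ("development", pvK5), ("cloud", pvK6)]

-- 'any(k in t for k in kws)' — also A's inner 'for keyword in keywords: … break' (first hit)
def pvHits (kws : List String) (t : String) : Bool := kws.any (fun k => PySem.Str.isIn k t)

-- ===== PORT A =====
-- A's outer 'for category, keywords in patterns.items(): … break' — first matching category
def pvFindCat : List (String × List String) → String → Option String
  | [], _ => none
  | (c, kws) :: rest, t => if pvHits kws t then some c else pvFindCat rest t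

-- the 'categories' dict literal
def pvInitA : PySem.Dict String (List String) :=
  PySem.Dict.mk [("web", []), ("mail", []), ("database", []), ("infrastructure", []),
                 ("development", []), ("cloud", []), ("other", [])]

-- one iteration of A's outer loop: append the subdomain to its first matching category, else 'other'
def pvStepA (d : PySem.Dict String (List String)) (s : String) : PySem.Dict String (List String) :=
  match pvFindCat pvPatterns (PySem.Str.lower s) with
  | some c => d.modify c [] (fun l => l ++ [s])
  | none => d.modify "other" [] (fun l => l ++ [s])

def categorize_subdomains_py (subdomains : List String) : List (String × List String) :=
  (subdomains.foldl pvStepA pvInitA).items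

-- ===== PORT B =====
-- per-category full scans: a subdomain lands in a category iff it matches that category's
-- keywords and no keyword of any earlier category; 'prior' accumulates earlier keywords
def categorize_subdomains_py_alt (subdomains : List String) : List (String × List String) :=
  let r := pvPatterns.foldl
    (fun (acc : List (String × List String) × List String) (p : String × List String) =>
      (acc.1 ++ [(p.1, subdomains.filter
          (fun s => pvHits p.2 (PySem.Str.lower s) && !pvHits acc.2 (PySem.Str.lower s)))],
       acc.2 ++ p.2))
    ([], [])
  r.1 ++ [("other", subdomains.filter (fun s => !pvHits r.2 (PySem.Str.lower s)))]

-- ===== PRECONDITION & SPEC =====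
def Spec_categorize_subdomains_py (subdomains : List String) (out : List (String × List String)) : Prop := out = categorize_subdomains_py_alt subdomains
instance (subdomains : List String) (out : List (String × List String)) : Decidable (Spec_categorize_subdomains_py subdomains out) := by unfold Spec_categorize_subdomains_py; infer_instance

-- ===== CLAIM (what is proved, stated in full; the proofs are below) =====
def Claim_equal_categorize_subdomains_py : Prop := ∀ (subdomains : List String), Dom_categorize_subdomains_py subdomains → Spec_categorize_subdomains_py subdomains (categorize_subdomains_py subdomains)

-- ===== LEMMAS AND PROOFS =====

-- pvHits distributes over ++ of keyword lists (it is List.any)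
theorem pvHits_append (a b : List String) (t : String) :
    pvHits (a ++ b) t = (pvHits a t || pvHits b t) := List.any_append ..
theorem pvHits_nil (t : String) : pvHits [] t = false := rfl

-- A's dict state, keyed by its seven fixed category lists
def pvMkD (l1 l2 l3 l4 l5 l6 l7 : List String) : PySem.Dict String (List String) :=
  PySem.Dict.mk [("web", l1), ("mail", l2), ("database", l3), ("infrastructure", l4),
                 ("development", l5), ("cloud", l6), ("other", l7)]

-- invariant of A's loop: each category list grows by exactly the subdomains whose first
-- matching category it is, i.e. those hitting its keywords but none of the earlier ones
theorem pv_key (xs : List String) : ∀ l1 l2 l3 l4 l5 l6 l7 : List String,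
    (xs.foldl pvStepA (pvMkD l1 l2 l3 l4 l5 l6 l7)).items =
      [("web", l1 ++ xs.filter (fun s => pvHits pvK1 (PySem.Str.lower s) && !pvHits [] (PySem.Str.lower s))),
       ("mail", l2 ++ xs.filter (fun s => pvHits pvK2 (PySem.Str.lower s) && !pvHits pvK1 (PySem.Str.lower s))),
       ("database", l3 ++ xs.filter (fun s => pvHits pvK3 (PySem.Str.lower s) && !pvHits (pvK1 ++ pvK2) (PySem.Str.lower s))),
       ("infrastructure", l4 ++ xs.filter (fun s => pvHits pvK4 (PySem.Str.lower s) && !pvHits (pvK1 ++ pvK2 ++ pvK3) (PySem.Str.lower s))),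
       ("development", l5 ++ xs.filter (fun s => pvHits pvK5 (PySem.Str.lower s) && !pvHits (pvK1 ++ pvK2 ++ pvK3 ++ pvK4) (PySem.Str.lower s))),
       ("cloud", l6 ++ xs.filter (fun s => pvHits pvK6 (PySem.Str.lower s) && !pvHits (pvK1 ++ pvK2 ++ pvK3 ++ pvK4 ++ pvK5) (PySem.Str.lower s))),
       ("other", l7 ++ xs.filter (fun s => !pvHits (pvK1 ++ pvK2 ++ pvK3 ++ pvK4 ++ pvK5 ++ pvK6) (PySem.Str.lower s)))] := by
  induction xs with
  | nil => intro l1 l2 l3 l4 l5 l6 l7; simp [pvMkD]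
  | cons x t ih =>
    intro l1 l2 l3 l4 l5 l6 l7
    by_cases h1 : pvHits pvK1 (PySem.Str.lower x)
    · -- first match: web
      have hs : pvStepA (pvMkD l1 l2 l3 l4 l5 l6 l7) x = pvMkD (l1 ++ [x]) l2 l3 l4 l5 l6 l7 := by
        simp [pvStepA, pvFindCat, pvPatterns, pvMkD, h1, PySem.Dict.modify,
          PySem.Dict.insert, PySem.Dict.getD, PySem.Dict.get?, PySem.Dict.contains]
      rw [List.foldl_cons, hs, ih]
      simp [pvHits_append, pvHits_nil, h1, List.append_assoc]
    by_cases h2 : pvHits pvK2 (PySem.Str.lower x)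
    · -- first match: mail
      have hs : pvStepA (pvMkD l1 l2 l3 l4 l5 l6 l7) x = pvMkD l1 (l2 ++ [x]) l3 l4 l5 l6 l7 := by
        simp [pvStepA, pvFindCat, pvPatterns, pvMkD, h1, h2, PySem.Dict.modify,
          PySem.Dict.insert, PySem.Dict.getD, PySem.Dict.get?, PySem.Dict.contains]
      rw [List.foldl_cons, hs, ih]
      simp [pvHits_append, pvHits_nil, h1, h2, List.append_assoc]
    by_cases h3 : pvHits pvK3 (PySem.Str.lower x)
    · -- first match: database
      have hs : pvStepA (pvMkD l1 l2 l3 l4 l5 l6 l7) x = pvMkD l1 l2 (l3 ++ [x]) l4 l5 l6 l7 := by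
        simp [pvStepA, pvFindCat, pvPatterns, pvMkD, h1, h2, h3, PySem.Dict.modify,
          PySem.Dict.insert, PySem.Dict.getD, PySem.Dict.get?, PySem.Dict.contains]
      rw [List.foldl_cons, hs, ih]
      simp [pvHits_append, pvHits_nil, h1, h2, h3, List.append_assoc]
    by_cases h4 : pvHits pvK4 (PySem.Str.lower x)
    · -- first match: infrastructure
      have hs : pvStepA (pvMkD l1 l2 l3 l4 l5 l6 l7) x = pvMkD l1 l2 l3 (l4 ++ [x]) l5 l6 l7 := by
        simp [pvStepA, pvFindCat, pvPatterns, pvMkD, h1, h2, h3, h4, PySem.Dict.modify,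
          PySem.Dict.insert, PySem.Dict.getD, PySem.Dict.get?, PySem.Dict.contains]
      rw [List.foldl_cons, hs, ih]
      simp [pvHits_append, pvHits_nil, h1, h2, h3, h4, List.append_assoc]
    by_cases h5 : pvHits pvK5 (PySem.Str.lower x)
    · -- first match: development
      have hs : pvStepA (pvMkD l1 l2 l3 l4 l5 l6 l7) x = pvMkD l1 l2 l3 l4 (l5 ++ [x]) l6 l7 := by
        simp [pvStepA, pvFindCat, pvPatterns, pvMkD, h1, h2, h3, h4, h5, PySem.Dict.modify,
          PySem.Dict.insert, PySem.Dict.getD, PySem.Dict.get?, PySem.Dict.contains]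
      rw [List.foldl_cons, hs, ih]
      simp [pvHits_append, pvHits_nil, h1, h2, h3, h4, h5, List.append_assoc]
    by_cases h6 : pvHits pvK6 (PySem.Str.lower x)
    · -- first match: cloud
      have hs : pvStepA (pvMkD l1 l2 l3 l4 l5 l6 l7) x = pvMkD l1 l2 l3 l4 l5 (l6 ++ [x]) l7 := by
        simp [pvStepA, pvFindCat, pvPatterns, pvMkD, h1, h2, h3, h4, h5, h6, PySem.Dict.modify,
          PySem.Dict.insert, PySem.Dict.getD, PySem.Dict.get?, PySem.Dict.contains]
      rw [List.foldl_cons, hs, ih]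
      simp [pvHits_append, pvHits_nil, h1, h2, h3, h4, h5, h6, List.append_assoc]
    -- no category matches: other
    have hs : pvStepA (pvMkD l1 l2 l3 l4 l5 l6 l7) x = pvMkD l1 l2 l3 l4 l5 l6 (l7 ++ [x]) := by
      simp [pvStepA, pvFindCat, pvPatterns, pvMkD, h1, h2, h3, h4, h5, h6, PySem.Dict.modify,
        PySem.Dict.insert, PySem.Dict.getD, PySem.Dict.get?, PySem.Dict.contains]
    rw [List.foldl_cons, hs, ih]
    simp [pvHits_append, pvHits_nil, h1, h2, h3, h4, h5, h6, List.append_assoc]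


-- ===== VERDICT (by name: the statement is the Claim_ definition above) =====
theorem categorize_subdomains_py_spec : Claim_equal_categorize_subdomains_py := by
  intro subdomains _
  show _ = _
  have h := pv_key subdomains [] [] [] [] [] [] []
  simp only [List.nil_append] at h
  simpa [categorize_subdomains_py, categorize_subdomains_py_alt, pvInitA, pvMkD, pvPatterns,
    List.foldl, pvHits, List.any_append] using h
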